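-- pv_equiv track=rewrite | github.com/kriba24/CodeHS-Python-Answers | Unit 8/Replit Problem Set/Swap Neighbors.py | hello
-- ===== SOURCE A (Python) =====
-- def hello(name):
-- 	name = name.split()
-- 	newList = []
-- 	if len(name) % 2 == 0:
-- 		for i in range(len(name)):
-- 			if i % 2 == 0:
-- 				newList.append(int(name[i + 1]))
-- 			else:
-- 				newList.append(int(name[i - 1]))
-- 	else:
-- 		for i in range(len(name) - 1):
-- 			if i % 2 == 0:
-- 				newList.append(int(name[i + 1]))
-- 			else:
-- 				newList.append(int(name[i - 1]))
-- 		newList.append(int(name[-1]))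
-- 	return newList
-- ===== SOURCE B (Python) =====
-- def hello(name):
--     tokens = name.split()
--     out = []
--     for i in range(0, len(tokens), 2):
--         if i + 1 < len(tokens):
--             out.append(int(tokens[i + 1]))
--             out.append(int(tokens[i]))
--         else:
--             out.append(int(tokens[i]))
--     return out
-- ===== Notes on version B (the rewrite author's own statement) =====
-- stated objective: simpler
-- what changed: B replaces A's top-level even/odd-length branch and per-index parity test with a single loop stepping by two over the token list, emitting each neighboring pair swapped (and the lone final token as is).
import Mathlib
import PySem

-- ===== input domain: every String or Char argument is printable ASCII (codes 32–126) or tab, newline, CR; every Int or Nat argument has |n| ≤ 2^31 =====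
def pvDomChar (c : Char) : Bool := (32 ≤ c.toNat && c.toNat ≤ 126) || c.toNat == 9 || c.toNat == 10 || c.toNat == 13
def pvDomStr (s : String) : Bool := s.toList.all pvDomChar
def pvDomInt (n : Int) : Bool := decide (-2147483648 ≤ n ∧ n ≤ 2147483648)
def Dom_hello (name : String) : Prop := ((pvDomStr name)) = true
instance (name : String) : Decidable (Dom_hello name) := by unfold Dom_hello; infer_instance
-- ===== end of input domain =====

-- B swaps neighbors in one step-2 loop over the token pairs instead of A's
-- parity test per index under a top-level even/odd-length branch (objective: simpler).

-- int(tok): ValueError is excluded by Pre_hello, so the port totalizes with .getD 0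
def pvInt (t : String) : Int := (PySem.Int.ofStr? t).getD 0

-- ===== PORT A =====
def hello (name : String) : List Int :=
  let ts := PySem.Str.split₀ name
  if ts.length % 2 == 0 then
    (PySem.List.pyRange 0 (ts.length : Int) 1).foldl
      (fun acc i =>
        if i % 2 == 0 then acc ++ [pvInt ((PySem.List.pyGet? ts (i + 1)).getD "")]
        else acc ++ [pvInt ((PySem.List.pyGet? ts (i - 1)).getD "")]) []
  else
    ((PySem.List.pyRange 0 ((ts.length : Int) - 1) 1).foldl
      (fun acc i =>
        if i % 2 == 0 then acc ++ [pvInt ((PySem.List.pyGet? ts (i + 1)).getD "")]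
        else acc ++ [pvInt ((PySem.List.pyGet? ts (i - 1)).getD "")]) [])
      ++ [pvInt ((PySem.List.pyGet? ts (-1)).getD "")]

-- ===== PORT B =====
-- the step-2 loop of Source B: each iteration consumes one pair (or the lone final token)
def swapPairs : List String → List Int
  | [] => []
  | [x] => [pvInt x]
  | x :: y :: rest => pvInt y :: pvInt x :: swapPairs rest

def hello_alt (name : String) : List Int := swapPairs (PySem.Str.split₀ name)

-- ===== PRECONDITION & SPEC =====
-- Pre_ excludes exactly the inputs where some token is not int()-parseable (Python raises ValueError)
def Pre_hello (name : String) : Prop :=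
  ((PySem.Str.split₀ name).all (fun t => (PySem.Int.ofStr? t).isSome)) = true
instance (name : String) : Decidable (Pre_hello name) := by unfold Pre_hello; infer_instance
def pvWitness_hello : String := "3 5 7 10"

def Spec_hello (name : String) (out : List Int) : Prop := out = hello_alt name
instance (name : String) (out : List Int) : Decidable (Spec_hello name out) := by unfold Spec_hello; infer_instance

-- ===== CLAIM (what is proved, stated in full; the proofs are below) =====
def Claim_equal_hello : Prop := ∀ (name : String), Dom_hello name → Pre_hello name → Spec_hello name (hello name)

-- ===== LEMMAS AND PROOFS =====

-- A's body after the split, on an arbitrary token list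
def helloCore (ts : List String) : List Int :=
  if ts.length % 2 == 0 then
    (PySem.List.pyRange 0 (ts.length : Int) 1).foldl
      (fun acc i =>
        if i % 2 == 0 then acc ++ [pvInt ((PySem.List.pyGet? ts (i + 1)).getD "")]
        else acc ++ [pvInt ((PySem.List.pyGet? ts (i - 1)).getD "")]) []
  else
    ((PySem.List.pyRange 0 ((ts.length : Int) - 1) 1).foldl
      (fun acc i =>
        if i % 2 == 0 then acc ++ [pvInt ((PySem.List.pyGet? ts (i + 1)).getD "")]
        else acc ++ [pvInt ((PySem.List.pyGet? ts (i - 1)).getD "")]) [])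
      ++ [pvInt ((PySem.List.pyGet? ts (-1)).getD "")]

def F (ts : List String) (i : Int) : Int :=
  if i % 2 == 0 then pvInt ((PySem.List.pyGet? ts (i + 1)).getD "")
  else pvInt ((PySem.List.pyGet? ts (i - 1)).getD "")

lemma fold_to_map (ts : List String) (n : Int) :
    (PySem.List.pyRange 0 n 1).foldl
      (fun acc i =>
        if i % 2 == 0 then acc ++ [pvInt ((PySem.List.pyGet? ts (i + 1)).getD "")]
        else acc ++ [pvInt ((PySem.List.pyGet? ts (i - 1)).getD "")]) []
    = (List.range n.toNat).map (fun (k : Nat) => F ts (k : Int)) := by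
  have h := PySem.List.foldl_append_singleton_eq_map (l := PySem.List.pyRange 0 n 1)
    (f := F ts) (acc := ([] : List Int))
  rw [show (fun (acc : List Int) (i : Int) =>
        if i % 2 == 0 then acc ++ [pvInt ((PySem.List.pyGet? ts (i + 1)).getD "")]
        else acc ++ [pvInt ((PySem.List.pyGet? ts (i - 1)).getD "")])
      = (fun acc i => acc ++ [F ts i]) from by
    funext acc i; unfold F; split <;> rfl]
  rw [h, PySem.List.pyRange_one, List.map_map]
  simp only [Int.sub_zero, List.nil_append]
  exact List.map_congr_left (fun k _ => by simp)

lemma helloCore_closed (ts : List String) :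
    helloCore ts =
      if ts.length % 2 = 0 then (List.range ts.length).map (fun (k : Nat) => F ts (k : Int))
      else (List.range (ts.length - 1)).map (fun (k : Nat) => F ts (k : Int))
        ++ [pvInt ((PySem.List.pyGet? ts (-1)).getD "")] := by
  unfold helloCore
  rw [fold_to_map, fold_to_map]
  have h1 : ((ts.length : Int)).toNat = ts.length := by omega
  have h2 : ((ts.length : Int) - 1).toNat = ts.length - 1 := by omega
  rw [h1, h2]
  by_cases h : ts.length % 2 = 0 <;> simp [h]

lemma range_peel2 (n : Nat) :
    List.range (n + 2) = 0 :: 1 :: (List.range n).map (fun k => k + 2) := by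
  rw [List.range_succ_eq_map, List.range_succ_eq_map, List.map_cons, List.map_map]
  rfl

lemma F_zero (x y : String) (ts : List String) :
    F (x :: y :: ts) 0 = pvInt y := by
  unfold F
  simp [PySem.List.pyGet?, PySem.List.pyIdx?]

lemma F_one (x y : String) (ts : List String) :
    F (x :: y :: ts) 1 = pvInt x := by
  unfold F
  rw [show (((1 : Int) % 2 == 0)) = false from rfl]
  simp only [Bool.false_eq_true, if_false]
  simp only [PySem.List.pyGet?, PySem.List.pyIdx?, List.length_cons]
  simp only [show ((1 : Int) - 1) = 0 from rfl]
  rw [if_pos (le_refl (0 : Int))]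
  rw [if_pos (show (0 : Int) < ((ts.length + 1 + 1 : Nat) : Int) from by push_cast; omega)]
  rfl

lemma F_shift (x y : String) (ts : List String) (k : Nat) :
    F (x :: y :: ts) ((k : Int) + 2) = F ts k := by
  unfold F
  have hmod : ((k : Int) + 2) % 2 = (k : Int) % 2 := by omega
  rw [hmod]
  by_cases hk : (k : Int) % 2 = 0
  · simp only [hk, beq_self_eq_true, if_true]
    rw [show (k : Int) + 2 + 1 = ((k + 3 : Nat) : Int) from by push_cast; ring,
        show (k : Int) + 1 = ((k + 1 : Nat) : Int) from by push_cast; ring,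
        PySem.List.pyGet?_natCast, PySem.List.pyGet?_natCast,
        show k + 3 = k + 1 + 1 + 1 from rfl]
    simp only [List.getElem?_cons_succ]
  · have hk1 : ¬ ((k : Int) % 2 == 0) = true := by simpa using hk
    have h1 : 1 ≤ k := by omega
    simp only [hk1]
    rw [show (k : Int) + 2 - 1 = ((k + 1 : Nat) : Int) from by push_cast; ring,
        show (k : Int) - 1 = ((k - 1 : Nat) : Int) from by omega,
        PySem.List.pyGet?_natCast, PySem.List.pyGet?_natCast,
        show k + 1 = (k - 1) + 2 from by omega,
        show (k - 1) + 2 = (k - 1) + 1 + 1 from rfl]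
    simp only [List.getElem?_cons_succ]
    simp

lemma neg_one_shift (x y : String) (ts : List String) (h : ts ≠ []) :
    PySem.List.pyGet? (x :: y :: ts) (-1) = PySem.List.pyGet? ts (-1) := by
  have hlen : 1 ≤ ts.length := List.length_pos_iff.mpr h
  simp only [PySem.List.pyGet?, PySem.List.pyIdx?, List.length_cons]
  have c1 : ¬ (0 : Int) ≤ -1 := by omega
  have c2 : -((ts.length + 1 + 1 : Nat) : Int) ≤ -1 := by push_cast; omega
  have c3 : -(ts.length : Int) ≤ -1 := by omega
  rw [if_neg c1, if_pos c2, if_neg c1, if_pos c3]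
  
  have h4 : ts.length + 1 + 1 - (-(-1 : Int)).toNat = (ts.length - 1) + 1 + 1 := by omega
  rw [h4]
  simp only [Option.bind_some, List.getElem?_cons_succ]
  congr 1

lemma core_eq (ts : List String) : helloCore ts = swapPairs ts := by
  induction ts using swapPairs.induct with
  | case1 => simp [helloCore_closed, swapPairs]
  | case2 x =>
      rw [helloCore_closed]
      simp only [List.length_cons, List.length_nil]
      norm_num
      simp [swapPairs, PySem.List.pyGet?, PySem.List.pyIdx?]
  | case3 x y rest ih =>
      rw [helloCore_closed] at ih ⊢
      simp only [List.length_cons]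
      have hlen : rest.length + 1 + 1 = rest.length + 2 := by omega
      rw [hlen]
      by_cases hp : rest.length % 2 = 0
      · have hp2 : (rest.length + 2) % 2 = 0 := by omega
        simp only [hp, if_true] at ih
        simp only [hp2, if_true]
        rw [range_peel2, List.map_cons, List.map_cons, List.map_map]
        simp only [Nat.cast_zero, Nat.cast_one]
        rw [F_zero, F_one]
        have : ((fun (k : Nat) => F (x :: y :: rest) (k : Int)) ∘ fun (k : Nat) => k + 2)
            = fun (k : Nat) => F rest (k : Int) := by
          funext k
          simp only [Function.comp]
          rw [show ((k + 2 : Nat) : Int) = (k : Int) + 2 from by push_cast; ring]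
          exact F_shift x y rest k
        rw [this]
        simp only [swapPairs]
        rw [← ih]
      · have hp2 : ¬ (rest.length + 2) % 2 = 0 := by omega
        have hne : rest ≠ [] := by intro h; rw [h] at hp; simp at hp
        simp only [hp, if_false] at ih
        simp only [hp2, if_false]
        have h1 : rest.length + 2 - 1 = (rest.length - 1) + 2 := by omega
        rw [h1, range_peel2, List.map_cons, List.map_cons, List.map_map]
        simp only [Nat.cast_zero, Nat.cast_one]
        rw [F_zero, F_one]
        have : ((fun (k : Nat) => F (x :: y :: rest) (k : Int)) ∘ fun (k : Nat) => k + 2)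
            = fun (k : Nat) => F rest (k : Int) := by
          funext k
          simp only [Function.comp]
          rw [show ((k + 2 : Nat) : Int) = (k : Int) + 2 from by push_cast; ring]
          exact F_shift x y rest k
        rw [this, neg_one_shift x y rest hne, swapPairs, ← ih]
        simp

-- ===== VERDICT (by name: the statement is the Claim_ definition above) =====
theorem hello_spec : Claim_equal_hello := by
  intro name _ _
  unfold Spec_hello hello hello_alt
  have := core_eq (PySem.Str.split₀ name)
  unfold helloCore at this
  exact this
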